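-- pv_equiv track=rewrite | github.com/Mouret-Orfeu/Projet-Code-circulaire | src/main_ter.py | get_graph_from_code
-- ===== SOURCE A (Python) =====
-- def get_nod_and_edge_tetra(tetra):
--     nods = set()
--     edges = set()
--     for slice_idx in range(1,4):
--
--         first_slice = tetra[0:slice_idx]
--         second_slice = tetra[slice_idx:]
--
--         nods.add(first_slice)
--         if slice_idx == 2:
--             #On évite de remettre un noeud qui est déjà dans le graphe (par ex pour "AAAA", on ne met pas 2 fois le noeud "AA" dans nods)
--             if second_slice != first_slice:
--                 nods.add(second_slice)
--         else:
--             nods.add(second_slice)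
--         edges.add((first_slice, second_slice))
--     return nods, edges
--
-- def get_graph_from_code(code):
--     nods = set()
--     edges = set()
--     for tetra in code:
--         nods_tetra, edges_tetra = get_nod_and_edge_tetra(tetra)
--         nods = nods | nods_tetra
--         edges = edges | edges_tetra
--     return nods, edges
-- ===== SOURCE B (Python) =====
-- def get_graph_from_code(code):
--     if not code:
--         return set(), set()
--     if len(code) == 1:
--         t = code[0]
--         edges = {(t[:1], t[1:]), (t[:2], t[2:]), (t[:3], t[3:])}
--         nods = {x for e in edges for x in e}
--         return nods, edges
--     mid = len(code) // 2
--     left_nods, left_edges = get_graph_from_code(code[:mid])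
--     right_nods, right_edges = get_graph_from_code(code[mid:])
--     return left_nods | right_nods, left_edges | right_edges
-- ===== Notes on version B (the rewrite author's own statement) =====
-- stated objective: faster
-- what changed: B replaces A's linear loop that copies the accumulated node/edge sets at every tetra (nods | nods_tetra builds a fresh set each iteration) by a divide-and-conquer recursion: split the code list in half, recursively build each half's graph and merge once by set union, with the leaf case building the three splits directly and deriving nodes from those edges.
import Mathlib
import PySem

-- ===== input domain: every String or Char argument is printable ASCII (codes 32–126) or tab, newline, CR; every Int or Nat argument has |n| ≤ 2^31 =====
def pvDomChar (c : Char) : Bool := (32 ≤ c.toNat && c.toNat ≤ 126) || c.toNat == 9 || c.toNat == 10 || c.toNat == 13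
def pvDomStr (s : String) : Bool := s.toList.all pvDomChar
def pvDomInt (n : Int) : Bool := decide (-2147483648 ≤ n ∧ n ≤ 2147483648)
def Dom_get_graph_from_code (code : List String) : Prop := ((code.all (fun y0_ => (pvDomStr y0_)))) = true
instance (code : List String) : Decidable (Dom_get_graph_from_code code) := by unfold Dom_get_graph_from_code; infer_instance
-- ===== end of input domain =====

-- B replaces A's loop, which copies the accumulated node/edge sets at every tetra, by a
-- divide-and-conquer recursion merging half-graphs by set union (objective: faster, measured).

-- ===== PORT A =====
def get_nod_and_edge_tetra (tetra : String) : PySem.Set String × PySem.Set (String × String) :=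
  (PySem.List.pyRange 1 4).foldl
    (fun st slice_idx =>
      let first_slice := PySem.Str.slice tetra (some 0) (some slice_idx)
      let second_slice := PySem.Str.slice tetra (some slice_idx) none
      let nods := PySem.Set.add st.1 first_slice
      let nods :=
        if slice_idx = 2 then
          if second_slice ≠ first_slice then PySem.Set.add nods second_slice else nods
        else PySem.Set.add nods second_slice
      (nods, PySem.Set.add st.2 (first_slice, second_slice)))
    (PySem.Set.empty, PySem.Set.empty)

def get_graph_from_code (code : List String) : List String × (List (String × String)) :=
  code.foldl
    (fun st tetra =>
      (PySem.Set.union st.1 (get_nod_and_edge_tetra tetra).1,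
       PySem.Set.union st.2 (get_nod_and_edge_tetra tetra).2))
    (PySem.Set.empty, PySem.Set.empty)

-- ===== PORT B =====
-- code[:mid] / code[mid:] with 0 ≤ mid ≤ len(code) are exactly take/drop.
def get_graph_from_code_alt (code : List String) : List String × (List (String × String)) :=
  match code with
  | [] => (PySem.Set.empty, PySem.Set.empty)
  | [t] =>
    let edges : PySem.Set (String × String) := PySem.Set.ofList
      [ (PySem.Str.slice t (some 0) (some 1), PySem.Str.slice t (some 1) none),
        (PySem.Str.slice t (some 0) (some 2), PySem.Str.slice t (some 2) none),
        (PySem.Str.slice t (some 0) (some 3), PySem.Str.slice t (some 3) none) ]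
    (PySem.Set.ofList (edges.flatMap (fun e => [e.1, e.2])), edges)
  | t1 :: t2 :: rest =>
    let mid := (t1 :: t2 :: rest).length / 2
    let l := get_graph_from_code_alt ((t1 :: t2 :: rest).take mid)
    let r := get_graph_from_code_alt ((t1 :: t2 :: rest).drop mid)
    (PySem.Set.union l.1 r.1, PySem.Set.union l.2 r.2)
termination_by code.length
decreasing_by
  · simp [List.length_take]; omega
  · simp [List.length_drop]; omega

-- ===== PRECONDITION & SPEC =====
def Spec_get_graph_from_code (code : List String) (out : List String × (List (String × String))) : Prop := out = get_graph_from_code_alt code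
instance (code : List String) (out : List String × (List (String × String))) : Decidable (Spec_get_graph_from_code code out) := by unfold Spec_get_graph_from_code; infer_instance

-- ===== CLAIM (what is proved, stated in full; the proofs are below) =====
def Claim_equal_get_graph_from_code : Prop := ∀ (code : List String), Dom_get_graph_from_code code → Spec_get_graph_from_code code (get_graph_from_code code)

-- ===== LEMMAS AND PROOFS =====

-- the three (first_slice, second_slice) pairs a tetra generates, in order
def pvPairs (tetra : String) : List (String × String) :=
  [ (PySem.Str.slice tetra (some 0) (some 1), PySem.Str.slice tetra (some 1) none),
    (PySem.Str.slice tetra (some 0) (some 2), PySem.Str.slice tetra (some 2) none),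
    (PySem.Str.slice tetra (some 0) (some 3), PySem.Str.slice tetra (some 3) none) ]

-- the endpoints of a pair list, in order
def pvFlat {α : Type} (ps : List (α × α)) : List α := ps.flatMap (fun p => [p.1, p.2])

-- the canonical left-to-right edge accumulation both programs are reduced to
def pvCanon (E : PySem.Set (String × String)) (code : List String) : PySem.Set (String × String) :=
  code.foldl (fun E tetra => PySem.Set.update E (pvPairs tetra)) E

lemma pv_pyRange14 : PySem.List.pyRange 1 4 = [1, 2, 3] := by decide

lemma pv_update_cons {α : Type} [BEq α] (s : PySem.Set α) (x : α) (l : List α) :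
    PySem.Set.update s (x :: l) = PySem.Set.update (PySem.Set.add s x) l := rfl

lemma pv_update_empty {α : Type} [BEq α] (l : List α) :
    PySem.Set.update PySem.Set.empty l = PySem.Set.ofList l :=
  (PySem.Set.ofList_eq_foldl l).symm

lemma pv_add_eq_of_mem {α : Type} [BEq α] [LawfulBEq α] {s : PySem.Set α} {x : α}
    (h : x ∈ s) : PySem.Set.add s x = s := by
  simp [PySem.Set.add, PySem.Set.contains, h]

lemma pv_mem_add_of_mem {α : Type} [BEq α] [LawfulBEq α] {s : PySem.Set α} {x : α} (y : α)
    (h : x ∈ s) : x ∈ PySem.Set.add s y :=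
  (PySem.Set.mem_add s y x).mpr (Or.inl h)

lemma pv_mem_add_self {α : Type} [BEq α] [LawfulBEq α] (s : PySem.Set α) (x : α) :
    x ∈ PySem.Set.add s x :=
  (PySem.Set.mem_add s x x).mpr (Or.inr rfl)

lemma pv_add_not_mem {α : Type} [BEq α] [LawfulBEq α] {s : PySem.Set α} {x : α}
    (h : ¬ x ∈ s) : PySem.Set.add s x = s ++ [x] := by
  simp [PySem.Set.add, PySem.Set.contains, h]

lemma pv_mem_update_of_mem {α : Type} [BEq α] [LawfulBEq α] {s : PySem.Set α} {x : α}
    (l : List α) (h : x ∈ s) : x ∈ PySem.Set.update s l := by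
  induction l generalizing s with
  | nil => exact h
  | cons y l ih => exact ih (pv_mem_add_of_mem y h)

lemma pv_mem_update_right {α : Type} [BEq α] [LawfulBEq α] {l : List α} {x : α}
    (s : PySem.Set α) (h : x ∈ l) : x ∈ PySem.Set.update s l := by
  induction l generalizing s with
  | nil => cases h
  | cons y l ih =>
    rw [pv_update_cons]
    rcases List.mem_cons.mp h with rfl | hx
    · exact pv_mem_update_of_mem l (pv_mem_add_self s x)
    · exact ih _ hx

lemma pv_update_append_singleton {α : Type} [BEq α] (s : PySem.Set α) (t : List α) (x : α) :
    PySem.Set.update s (t ++ [x]) = PySem.Set.add (PySem.Set.update s t) x := by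
  simp [PySem.Set.update, List.foldl_append]

-- chaining updates: s | (t | l) = (s | t) | l on the representation level
lemma pv_update_update {α : Type} [BEq α] [LawfulBEq α] (l : List α)
    (t s : PySem.Set α) :
    PySem.Set.update s (PySem.Set.update t l) = PySem.Set.update (PySem.Set.update s t) l := by
  induction l generalizing t s with
  | nil => rfl
  | cons x l ih =>
    rw [pv_update_cons t, pv_update_cons (PySem.Set.update s t)]
    by_cases h : x ∈ t
    · rw [pv_add_eq_of_mem h, pv_add_eq_of_mem (pv_mem_update_right s h)]
      exact ih t s
    · rw [ih (PySem.Set.add t x) s, pv_add_not_mem h, pv_update_append_singleton]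

lemma pv_update_ofList {α : Type} [BEq α] [LawfulBEq α] (s : PySem.Set α) (l : List α) :
    PySem.Set.update s (PySem.Set.ofList l) = PySem.Set.update s l := by
  rw [PySem.Set.ofList_eq_foldl]
  exact pv_update_update l [] s

-- one pair preserves the "nodes = dedup of edge endpoints" invariant
lemma pv_pair_step {α : Type} [BEq α] [LawfulBEq α] (p : α × α) (E : PySem.Set (α × α)) :
    PySem.Set.add (PySem.Set.add (PySem.Set.ofList (pvFlat E)) p.1) p.2
      = PySem.Set.ofList (pvFlat (PySem.Set.add E p)) := by
  by_cases hp : p ∈ E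
  · have h1 : p.1 ∈ PySem.Set.ofList (pvFlat E) :=
      (PySem.Set.mem_ofList _ _).mpr (List.mem_flatMap.mpr ⟨p, hp, by simp⟩)
    have h2 : p.2 ∈ PySem.Set.ofList (pvFlat E) :=
      (PySem.Set.mem_ofList _ _).mpr (List.mem_flatMap.mpr ⟨p, hp, by simp⟩)
    rw [pv_add_eq_of_mem h1, pv_add_eq_of_mem h2, pv_add_eq_of_mem hp]
  · rw [pv_add_not_mem hp]
    have hf : pvFlat (E ++ [p]) = pvFlat E ++ [p.1, p.2] := by
      simp [pvFlat]
    rw [hf, PySem.Set.ofList_eq_foldl, PySem.Set.ofList_eq_foldl, List.foldl_append]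
    rfl

-- updating the endpoint dedup with a pair list's endpoints = dedup of the updated edge set
lemma pv_pairs_step {α : Type} [BEq α] [LawfulBEq α] (ps : List (α × α))
    (E : PySem.Set (α × α)) :
    PySem.Set.update (PySem.Set.ofList (pvFlat E)) (pvFlat ps)
      = PySem.Set.ofList (pvFlat (PySem.Set.update E ps)) := by
  induction ps generalizing E with
  | nil => rfl
  | cons p ps ih =>
    show PySem.Set.update
        (PySem.Set.add (PySem.Set.add (PySem.Set.ofList (pvFlat E)) p.1) p.2) (pvFlat ps) = _
    rw [pv_pair_step, ih]
    rfl

-- A's per-tetra helper computes (dedup'd endpoints, dedup'd pairs) of pvPairs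
set_option maxHeartbeats 1000000 in
lemma pv_tetra_eq (tetra : String) :
    get_nod_and_edge_tetra tetra
      = (PySem.Set.ofList (pvFlat (pvPairs tetra)), PySem.Set.ofList (pvPairs tetra)) := by
  unfold get_nod_and_edge_tetra
  rw [pv_pyRange14]
  simp only [List.foldl_cons, List.foldl_nil]
  norm_num
  simp only [pvPairs, pvFlat, List.flatMap_cons, List.flatMap_nil, PySem.Set.ofList_eq_foldl,
    List.foldl_cons, List.foldl_nil, List.nil_append, List.cons_append]
  rcases eq_or_ne (PySem.Str.slice tetra (some 2) none) (PySem.Str.slice tetra (some 0) (some 2)) with h | h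
  · rw [if_pos h, h, pv_add_eq_of_mem (pv_mem_add_self _ _)]
    exact ⟨rfl, rfl⟩
  · rw [if_neg h]
    exact ⟨rfl, rfl⟩

-- main invariant for A: its running node set is the dedup of the endpoints of its edge set
lemma pv_main (code : List String) (N : PySem.Set String) (E : PySem.Set (String × String))
    (h : N = PySem.Set.ofList (pvFlat E)) :
    code.foldl
        (fun st tetra =>
          (PySem.Set.union st.1 (get_nod_and_edge_tetra tetra).1,
           PySem.Set.union st.2 (get_nod_and_edge_tetra tetra).2))
        (N, E)
      = (PySem.Set.ofList (pvFlat (pvCanon E code)), pvCanon E code) := by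
  induction code generalizing N E with
  | nil => simp [h, pvCanon]
  | cons t c ih =>
    simp only [List.foldl_cons, pvCanon]
    rw [pv_tetra_eq]
    have h1 : PySem.Set.union N (PySem.Set.ofList (pvFlat (pvPairs t)))
        = PySem.Set.ofList (pvFlat (PySem.Set.update E (pvPairs t))) := by
      show PySem.Set.update N (PySem.Set.ofList (pvFlat (pvPairs t))) = _
      rw [pv_update_ofList, h, pv_pairs_step]
    have h2 : PySem.Set.union E (PySem.Set.ofList (pvPairs t))
        = PySem.Set.update E (pvPairs t) := by
      show PySem.Set.update E (PySem.Set.ofList (pvPairs t)) = _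
      rw [pv_update_ofList]
    rw [h1, h2]
    exact ih _ _ rfl

-- updating with an accumulated edge set = continuing the accumulation (ordered-union associativity)
lemma pv_update_canon (r : List String) (S E : PySem.Set (String × String)) :
    PySem.Set.update S (pvCanon E r) = pvCanon (PySem.Set.update S E) r := by
  induction r generalizing S E with
  | nil => rfl
  | cons t r ih =>
    show PySem.Set.update S (pvCanon (PySem.Set.update E (pvPairs t)) r) = _
    rw [ih, pv_update_update]
    rfl

-- B's divide-and-conquer equals the canonical accumulation, with nodes = dedup'd endpoints
set_option maxHeartbeats 1000000 in
lemma pv_alt_eq (code : List String) :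
    get_graph_from_code_alt code
      = (PySem.Set.ofList (pvFlat (pvCanon PySem.Set.empty code)), pvCanon PySem.Set.empty code) := by
  induction code using get_graph_from_code_alt.induct with
  | case1 => simp [get_graph_from_code_alt, pvCanon, pvFlat]
  | case2 t =>
    have he : pvCanon PySem.Set.empty [t] = PySem.Set.ofList (pvPairs t) := by
      show PySem.Set.update PySem.Set.empty (pvPairs t) = _
      rw [pv_update_empty]
    simp only [get_graph_from_code_alt, he, pvPairs, pvFlat]
  | case3 t1 t2 rest mid ihl ihr =>
    simp only [get_graph_from_code_alt]
    rw [ihl, ihr]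
    have hsplit := List.take_append_drop mid (t1 :: t2 :: rest)
    have hcat : pvCanon PySem.Set.empty (t1 :: t2 :: rest)
        = pvCanon (pvCanon PySem.Set.empty ((t1 :: t2 :: rest).take mid))
            ((t1 :: t2 :: rest).drop mid) := by
      conv_lhs => rw [← hsplit]
      simp only [pvCanon, List.foldl_append]
    have hedge : PySem.Set.update (pvCanon PySem.Set.empty ((t1 :: t2 :: rest).take mid))
          (pvCanon PySem.Set.empty ((t1 :: t2 :: rest).drop mid))
        = pvCanon PySem.Set.empty (t1 :: t2 :: rest) := by
      rw [pv_update_canon, hcat]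
      exact rfl
    have hnode : PySem.Set.update
          (PySem.Set.ofList (pvFlat (pvCanon PySem.Set.empty ((t1 :: t2 :: rest).take mid))))
          (PySem.Set.ofList (pvFlat (pvCanon PySem.Set.empty ((t1 :: t2 :: rest).drop mid))))
        = PySem.Set.ofList (pvFlat (pvCanon PySem.Set.empty (t1 :: t2 :: rest))) := by
      rw [pv_update_ofList, pv_pairs_step, hedge]
    show (PySem.Set.update _ _, PySem.Set.update _ _) = _
    rw [hedge, hnode]

-- ===== VERDICT (by name: the statement is the Claim_ definition above) =====
theorem get_graph_from_code_spec : Claim_equal_get_graph_from_code := by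
  intro code _
  unfold Spec_get_graph_from_code get_graph_from_code
  rw [pv_alt_eq]
  exact pv_main code PySem.Set.empty PySem.Set.empty rfl
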